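-- pv_equiv track=rewrite | github.com/arturoTellez/lectura_pdf | debito_scotia.py | asignar_lineas
-- ===== SOURCE A (Python) =====
-- def asignar_lineas(words, y_tol=3):
--     """
--     Asigna un número de línea a cada palabra según su coordenada vertical (top).
--     """
--     words = sorted(words, key=lambda w: w["top"])
--     current_line = 0
--     last_top = None
--     for w in words:
--         top = w["top"]
--         if last_top is None or abs(top - last_top) > y_tol:
--             current_line += 1
--         w["line_id"] = current_line
--         last_top = top
--     return words
-- ===== SOURCE B (Python) =====
-- def asignar_lineas(words, y_tol=3):
--     """
--     Asigna un número de línea a cada palabra según su coordenada vertical (top),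
--     agrupando primero en corridas y numerando después.
--     """
--     ws = sorted(words, key=lambda w: w["top"])
--     groups = []
--     for w in ws:
--         if groups and abs(w["top"] - groups[-1][-1]["top"]) <= y_tol:
--             groups[-1].append(w)
--         else:
--             groups.append([w])
--     for line_id, group in enumerate(groups, 1):
--         for w in group:
--             w["line_id"] = line_id
--     return [w for g in groups for w in g]
-- ===== Notes on version B (the rewrite author's own statement) =====
-- stated objective: alternative
-- what changed: A numbers lines in one stateful scan carrying (current_line, last_top); B first partitions the sorted words into gap-bounded runs (groups) and then numbers the groups with enumerate, assigning each group's id to all its words.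
import Mathlib
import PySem

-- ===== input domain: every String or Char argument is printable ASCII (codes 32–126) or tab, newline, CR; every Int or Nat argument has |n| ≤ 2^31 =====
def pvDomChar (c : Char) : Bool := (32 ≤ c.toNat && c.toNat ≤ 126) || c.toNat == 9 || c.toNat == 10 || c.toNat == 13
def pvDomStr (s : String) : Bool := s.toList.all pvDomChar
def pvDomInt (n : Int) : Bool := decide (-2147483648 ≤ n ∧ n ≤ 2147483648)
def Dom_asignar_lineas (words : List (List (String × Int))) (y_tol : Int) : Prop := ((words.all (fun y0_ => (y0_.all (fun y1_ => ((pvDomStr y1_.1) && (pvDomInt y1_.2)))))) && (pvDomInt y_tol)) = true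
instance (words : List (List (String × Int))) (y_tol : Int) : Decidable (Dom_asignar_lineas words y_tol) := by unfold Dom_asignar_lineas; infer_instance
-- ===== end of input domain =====

-- B replaces A's stateful scan with an explicit group-then-number decomposition (objective: alternative).
-- Python A and B mutate the word dicts in place; the equivalence proved here is about the returned list of dicts.

-- w["top"]  (Pre_ guarantees the key is present, so the default is never used)
def pvTop (w : List (String × Int)) : Int := (PySem.Dict.mk w).getD "top" 0

-- w["line_id"] = n  (dict assignment: overwrite keeps position, new key appends)
def pvSetLine (w : List (String × Int)) (n : Int) : List (String × Int) :=
  ((PySem.Dict.mk w).insert "line_id" n).items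

-- ===== PORT A =====
-- A's for-loop, carrying (current_line, last_top)
def pvLoopA (y_tol : Int) : List (List (String × Int)) → Int → Option Int → List (List (String × Int))
  | [], _, _ => []
  | w :: rest, cl, lt =>
    let top := pvTop w
    let cl' := match lt with
      | none => cl + 1
      | some l => if |top - l| > y_tol then cl + 1 else cl
    pvSetLine w cl' :: pvLoopA y_tol rest cl' (some top)

def asignar_lineas (words : List (List (String × Int))) (y_tol : Int) : List (List (String × Int)) :=
  pvLoopA y_tol (PySem.List.sorted words pvTop false) 0 none

-- ===== PORT B =====
-- Source B's grouping loop: append to groups[-1] if within tolerance of its last word, else open a new group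
def pvStepB (y_tol : Int) (gs : List (List (List (String × Int)))) (w : List (String × Int)) :
    List (List (List (String × Int))) :=
  match gs.getLast? with
  | some g =>
      if |pvTop w - pvTop (g.getLast?.getD [])| ≤ y_tol then gs.dropLast ++ [g ++ [w]]
      else gs ++ [[w]]
  | none => [[w]]

def asignar_lineas_alt (words : List (List (String × Int))) (y_tol : Int) : List (List (String × Int)) :=
  let ws := PySem.List.sorted words pvTop false
  let groups := ws.foldl (pvStepB y_tol) []
  -- for line_id, group in enumerate(groups, 1): for w in group: w["line_id"] = line_id; return flattened
  (groups.zipIdx 1).flatMap (fun p => p.1.map (fun w => pvSetLine w (p.2 : Int)))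

-- ===== PRECONDITION & SPEC =====
-- Pre_ excludes exactly the inputs where some word lacks the "top" key, on which Python A raises KeyError.
def Pre_asignar_lineas (words : List (List (String × Int))) (y_tol : Int) : Prop :=
  ∀ w ∈ words, "top" ∈ w.map Prod.fst
instance (words : List (List (String × Int))) (y_tol : Int) : Decidable (Pre_asignar_lineas words y_tol) := by unfold Pre_asignar_lineas; infer_instance

def pvWitness_asignar_lineas : (List (List (String × Int))) × Int :=
  ([[("top", 20), ("x", 1)], [("top", 5)], [("top", 22), ("line_id", 9)]], 3)

def Spec_asignar_lineas (words : List (List (String × Int))) (y_tol : Int) (out : List (List (String × Int))) : Prop := out = asignar_lineas_alt words y_tol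
instance (words : List (List (String × Int))) (y_tol : Int) (out : List (List (String × Int))) : Decidable (Spec_asignar_lineas words y_tol out) := by unfold Spec_asignar_lineas; infer_instance

-- ===== CLAIM (what is proved, stated in full; the proofs are below) =====
def Claim_equal_asignar_lineas : Prop := ∀ (words : List (List (String × Int))) (y_tol : Int), Dom_asignar_lineas words y_tol → Pre_asignar_lineas words y_tol → Spec_asignar_lineas words y_tol (asignar_lineas words y_tol)

-- ===== LEMMAS AND PROOFS =====

-- assignment of consecutive line ids to groups, proof-side reformulation of B's enumerate pass
def pvAssign : List (List (List (String × Int))) → Int → List (List (String × Int))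
  | [], _ => []
  | g :: t, n => g.map (fun w => pvSetLine w n) ++ pvAssign t (n + 1)

theorem pvAssign_eq_zipIdx (gs : List (List (List (String × Int)))) (k : Nat) :
    (gs.zipIdx k).flatMap (fun p => p.1.map (fun w => pvSetLine w (p.2 : Int))) = pvAssign gs (k : Int) := by
  induction gs generalizing k with
  | nil => simp [pvAssign]
  | cons g t ih =>
    simp [List.zipIdx_cons, pvAssign, ih (k + 1)]

theorem pvFoldB_acc (y_tol : Int) (ws : List (List (String × Int)))
    (gs : List (List (List (String × Int)))) (g : List (List (String × Int))) (hg : g ≠ []) :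
    ws.foldl (pvStepB y_tol) (gs ++ [g]) = gs ++ ws.foldl (pvStepB y_tol) [g] := by
  induction ws generalizing gs g with
  | nil => simp
  | cons w rest ih =>
    simp only [List.foldl_cons]
    have hlast : (gs ++ [g]).getLast? = some g := by simp
    by_cases hc : |pvTop w - pvTop (g.getLast?.getD [])| ≤ y_tol
    · have h1 : pvStepB y_tol (gs ++ [g]) w = gs ++ [g ++ [w]] := by
        simp [pvStepB, hlast, hc]
      have h2 : pvStepB y_tol [g] w = [g ++ [w]] := by
        simp [pvStepB, hc]
      rw [h1, h2, ih gs (g ++ [w]) (by simp)]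
    · have h1 : pvStepB y_tol (gs ++ [g]) w = (gs ++ [g]) ++ [[w]] := by
        simp [pvStepB, hlast, hc]
      have h2 : pvStepB y_tol [g] w = [g] ++ [[w]] := by
        simp [pvStepB, hc]
      rw [h1, h2, ih (gs ++ [g]) [w] (by simp), ih [g] [w] (by simp)]
      simp

theorem pvMain (y_tol : Int) (ws : List (List (String × Int)))
    (g : List (List (String × Int))) (p : List (String × Int)) (n : Int)
    (hp : g.getLast? = some p) :
    pvAssign (ws.foldl (pvStepB y_tol) [g]) n =
      g.map (fun w => pvSetLine w n) ++ pvLoopA y_tol ws n (some (pvTop p)) := by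
  induction ws generalizing g p n with
  | nil => simp [pvAssign, pvLoopA]
  | cons w rest ih =>
    simp only [List.foldl_cons]
    by_cases hc : |pvTop w - pvTop p| ≤ y_tol
    · have h2 : pvStepB y_tol [g] w = [g ++ [w]] := by
        simp [pvStepB, hp, hc]
      rw [h2, ih (g ++ [w]) w n (by simp)]
      simp [pvLoopA, not_lt.mpr hc]
    · have h2 : pvStepB y_tol [g] w = [g] ++ [[w]] := by
        simp [pvStepB, hp, hc]
      rw [h2, pvFoldB_acc y_tol rest [g] [w] (by simp)]
      have : pvAssign (g :: rest.foldl (pvStepB y_tol) [[w]]) n =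
          g.map (fun w => pvSetLine w n) ++ pvAssign (rest.foldl (pvStepB y_tol) [[w]]) (n + 1) := rfl
      simp only [List.cons_append, List.nil_append] at *
      rw [this, ih [w] w (n + 1) (by simp)]
      simp [pvLoopA, lt_of_not_ge hc]

theorem pvBothAgree (y_tol : Int) (ws : List (List (String × Int))) :
    pvLoopA y_tol ws 0 none =
      ((ws.foldl (pvStepB y_tol) []).zipIdx 1).flatMap
        (fun p => p.1.map (fun w => pvSetLine w (p.2 : Int))) := by
  rw [pvAssign_eq_zipIdx]
  simp only [Nat.cast_one]
  cases ws with
  | nil => simp [pvAssign, pvLoopA]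
  | cons w rest =>
    simp only [List.foldl_cons]
    have h0 : pvStepB y_tol [] w = [[w]] := by simp [pvStepB]
    rw [h0, pvMain y_tol rest [w] w 1 (by simp)]
    simp [pvLoopA]

-- ===== VERDICT (by name: the statement is the Claim_ definition above) =====
theorem asignar_lineas_spec : Claim_equal_asignar_lineas := by
  intro words y_tol _ _
  unfold Spec_asignar_lineas asignar_lineas asignar_lineas_alt
  exact pvBothAgree y_tol (PySem.List.sorted words pvTop false)
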